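-- pv_equiv track=rewrite | github.com/yingzhuo1994/LeetCode | 3033_ModifyTheMatrix.py | modifiedMatrix
-- ===== SOURCE A (Python) =====
-- from typing import List
--
-- def modifiedMatrix(matrix: List[List[int]]) -> List[List[int]]:
--     m, n = len(matrix), len(matrix[0])
--     answer = [row[:] for row in matrix]
--     for j in range(n):
--         val = max([matrix[i][j] for i in range(m)])
--         for i in range(m):
--             if answer[i][j] == -1:
--                 answer[i][j] = val
--     return answer
-- ===== SOURCE B (Python) =====
-- from typing import List
--
-- def modifiedMatrix(matrix: List[List[int]]) -> List[List[int]]: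
--     # Lazy memoized column maxima: a column's max is computed only when a -1
--     # is first met in it, then cached; columns without -1 are never scanned.
--     cache = {}
--     answer = []
--     for row in matrix:
--         new_row = []
--         for j, v in enumerate(row):
--             if v == -1:
--                 if j not in cache:
--                     cache[j] = max(r[j] for r in matrix)
--                 new_row.append(cache[j])
--             else:
--                 new_row.append(v)
--         answer.append(new_row)
--     return answer
-- ===== Notes on version B (the rewrite author's own statement) =====
-- stated objective: alternative
-- what changed: B replaces A's eager per-column max-then-replace loops by a lazy memoized scheme: it streams the matrix row-major once, and the first time a -1 is met in a column it computes that column's max and caches it in a dict, so columns without any -1 are never scanned.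
-- outside the precondition, e.g. on modifiedMatrix([[1], [-1, -1]]): A returns [[1], [1, -1]], B raises IndexError
import Mathlib
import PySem

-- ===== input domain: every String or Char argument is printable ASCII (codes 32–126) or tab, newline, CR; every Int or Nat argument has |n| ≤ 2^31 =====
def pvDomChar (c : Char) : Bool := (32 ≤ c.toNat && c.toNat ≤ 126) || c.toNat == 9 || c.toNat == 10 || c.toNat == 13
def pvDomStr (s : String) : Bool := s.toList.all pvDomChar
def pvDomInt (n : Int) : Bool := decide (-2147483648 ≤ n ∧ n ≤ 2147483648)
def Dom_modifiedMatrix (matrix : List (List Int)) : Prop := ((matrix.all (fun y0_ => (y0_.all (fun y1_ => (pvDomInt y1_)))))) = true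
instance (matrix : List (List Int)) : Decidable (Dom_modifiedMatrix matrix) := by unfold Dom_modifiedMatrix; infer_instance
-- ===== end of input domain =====

-- B streams the matrix row-major once and computes a column's max lazily, the first time a -1 is
-- met in that column, caching it in a dict — an alternative scheme that never scans columns
-- without a -1; neither version mutates its input, the equivalence is about the return value.

-- ===== PORT A =====
-- Loop indices i, j come from range(m)/range(n) and are in-range Nats wherever Pre_ holds, so
-- xs.getD / xs.set are exact for Python's xs[i] reads and xs[i] = v writes there
-- (the out-of-range reads that make Python raise IndexError are excluded by Pre_).
def modifiedMatrix (matrix : List (List Int)) : List (List Int) :=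
  let m := matrix.length
  let n := (matrix.getD 0 []).length
  let answer := matrix.map (fun row => row)
  (List.range n).foldl (fun answer j =>
    let val := (PySem.List.max? ((List.range m).map (fun i => (matrix.getD i []).getD j 0)) (fun x => x)).getD 0
    (List.range m).foldl (fun answer i =>
      if (answer.getD i []).getD j 0 = -1 then
        answer.set i ((answer.getD i []).set j val)
      else answer) answer) answer

-- ===== PORT B =====
-- Source B's two nested for-loops become two nested foldl's threading the state they mutate:
-- the outer one threads (answer, cache), the inner one (new_row, cache); `j not in cache` is
-- Dict.contains, `cache[j] = max(r[j] for r in matrix)` is Dict.insert of the column max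
-- (max of a nonempty generator, exact under Pre_ since matrix ≠ [] there; r[j] with the
-- in-range j that Pre_ guarantees is pyGetD).
def modifiedMatrix_alt (matrix : List (List Int)) : List (List Int) :=
  (matrix.foldl
    (fun (st : List (List Int) × PySem.Dict Int Int) row =>
      let inner := (PySem.List.enumerate row).foldl
        (fun (st2 : List Int × PySem.Dict Int Int) jv =>
          if jv.2 = -1 then
            let cache := if st2.2.contains jv.1 then st2.2
              else st2.2.insert jv.1
                ((PySem.List.max? (matrix.map (fun r => PySem.List.pyGetD r jv.1 0)) (fun x => x)).getD 0)
            (st2.1 ++ [cache.getD jv.1 0], cache)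
          else (st2.1 ++ [jv.2], st2.2))
        ([], st.2)
      (st.1 ++ [inner.1], inner.2))
    ([], PySem.Dict.empty)).1

-- ===== PRECONDITION & SPEC =====
-- Pre_ excludes the empty matrix and matrices with a row shorter than the first row (A raises
-- IndexError on both), and rows carrying a -1 past the first row's length, where A's leaving
-- those -1 entries untouched is an artefact of n = len(matrix[0]) (B raises IndexError there).
def Pre_modifiedMatrix (matrix : List (List Int)) : Prop :=
  matrix ≠ [] ∧ ∀ row ∈ matrix,
    (matrix.getD 0 []).length ≤ row.length ∧
    ∀ x ∈ row.drop ((matrix.getD 0 []).length), x ≠ -1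
instance (matrix : List (List Int)) : Decidable (Pre_modifiedMatrix matrix) := by
  unfold Pre_modifiedMatrix; infer_instance
def pvWitness_modifiedMatrix : List (List Int) := [[1, -1], [-1, 2]]

def Spec_modifiedMatrix (matrix : List (List Int)) (out : List (List Int)) : Prop := out = modifiedMatrix_alt matrix
instance (matrix : List (List Int)) (out : List (List Int)) : Decidable (Spec_modifiedMatrix matrix out) := by unfold Spec_modifiedMatrix; infer_instance

-- ===== CLAIM (what is proved, stated in full; the proofs are below) =====
def Claim_equal_modifiedMatrix : Prop := ∀ (matrix : List (List Int)), Dom_modifiedMatrix matrix → Pre_modifiedMatrix matrix → Spec_modifiedMatrix matrix (modifiedMatrix matrix)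

-- ===== LEMMAS AND PROOFS =====

-- The maximum of column j of the original matrix (0 for an empty column), Nat index.
def colval (matrix : List (List Int)) (j : Nat) : Int :=
  (PySem.List.max? (matrix.map (fun r => r.getD j 0)) (fun x => x)).getD 0

-- The same quantity as B computes it, with the Int index coming from enumerate.
def colvalB (matrix : List (List Int)) (j : Int) : Int :=
  (PySem.List.max? (matrix.map (fun r => PySem.List.pyGetD r j 0)) (fun x => x)).getD 0

theorem colvalB_natCast (matrix : List (List Int)) (p : Nat) :
    colvalB matrix (p : Int) = colval matrix p := by
  unfold colvalB colval
  simp [PySem.List.pyGetD_natCast]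

-- The state of a row after A has processed columns 0 .. k-1.
def rowf (matrix : List (List Int)) (k : Nat) (r : List Int) : List Int :=
  r.mapIdx (fun p x => if p < k ∧ x = -1 then colval matrix p else x)

-- A's inner loop over i in range(k) rewrites each of the first k rows independently.
theorem inner_fold (j : Nat) (val : Int) (k : Nat) (ans : List (List Int)) :
    (List.range k).foldl (fun a i => if (a.getD i []).getD j 0 = -1 then a.set i ((a.getD i []).set j val) else a) ans
    = (ans.take k).map (fun r => if r.getD j 0 = -1 then r.set j val else r) ++ ans.drop k := by
  induction k with
  | zero => simp
  | succ k ih =>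
    rw [List.range_succ, List.foldl_append, ih]
    simp only [List.foldl_cons, List.foldl_nil]
    by_cases hk : k < ans.length
    · have hmin : min k ans.length = k := Nat.min_eq_left (le_of_lt hk)
      have hlen : ((ans.take k).map (fun r => if r.getD j 0 = -1 then r.set j val else r)).length = k := by
        simp [hmin]
      have hget : (((ans.take k).map (fun r => if r.getD j 0 = -1 then r.set j val else r) ++ ans.drop k).getD k []) = ans[k] := by
        rw [List.getD_eq_getElem?_getD, List.getElem?_append_right (by omega)]
        simp [hmin, List.getElem?_eq_getElem hk]
      rw [hget]
      rw [List.take_add_one, List.drop_eq_getElem_cons hk, List.getElem?_eq_getElem hk]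
      by_cases hc : ans[k].getD j 0 = -1
      · rw [if_pos hc, List.set_append_right _ _ (by omega), hlen, Nat.sub_self]
        simp only [List.set_cons_zero, Option.toList_some, List.map_append, List.map_cons,
          List.map_nil, if_pos hc, List.append_assoc, List.cons_append, List.nil_append]
      · rw [if_neg hc]
        simp only [Option.toList_some, List.map_append, List.map_cons,
          List.map_nil, if_neg hc, List.append_assoc, List.cons_append, List.nil_append]
    · have h1 : ans.take k = ans := List.take_of_length_le (by omega)
      have h2 : ans.drop k = ([] : List (List Int)) := List.drop_of_length_le (by omega)
      have hget : (((ans.take k).map (fun r => if r.getD j 0 = -1 then r.set j val else r) ++ ans.drop k).getD k []) = [] := by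
        rw [List.getD_eq_getElem?_getD, List.getElem?_eq_none (by simp [h1, h2]; omega)]
        rfl
      rw [hget]
      have h3 : ans.take (k+1) = ans := List.take_of_length_le (by omega)
      have h4 : ans.drop (k+1) = ([] : List (List Int)) := List.drop_of_length_le (by omega)
      simp [h1, h2, h3, h4]

theorem map_range_getD' {β : Type} (l : List (List Int)) (g : List Int → β) :
    (List.range l.length).map (fun i => g (l.getD i [])) = l.map g := by
  apply List.ext_getElem (by simp)
  intro i h1 h2
  simp only [List.getElem_map, List.getElem_range]
  rw [List.getD_eq_getElem?_getD, List.getElem?_eq_getElem (by simpa using h2)]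
  rfl

theorem getD_rowf_self (matrix : List (List Int)) (k : Nat) (r : List Int) :
    (rowf matrix k r).getD k 0 = r.getD k 0 := by
  unfold rowf
  by_cases hk : k < r.length
  · rw [List.getD_eq_getElem?_getD, List.getD_eq_getElem?_getD,
      List.getElem?_eq_getElem (by simpa using hk), List.getElem?_eq_getElem hk]
    simp
  · rw [List.getD_eq_getElem?_getD, List.getD_eq_getElem?_getD,
      List.getElem?_eq_none (by simpa using hk), List.getElem?_eq_none (by omega)]

-- One step of A's column loop advances rowf by one column.
theorem rowf_step (matrix : List (List Int)) (k : Nat) (r : List Int) :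
    (if (rowf matrix k r).getD k 0 = -1 then (rowf matrix k r).set k (colval matrix k)
     else rowf matrix k r) = rowf matrix (k+1) r := by
  rw [getD_rowf_self]
  by_cases hk : k < r.length
  · by_cases hc : r.getD k 0 = -1
    · rw [if_pos hc]
      have hck : r[k] = -1 := by
        rw [List.getD_eq_getElem?_getD, List.getElem?_eq_getElem hk] at hc; simpa using hc
      apply List.ext_getElem (by simp [rowf])
      intro p h1 h2
      have hp : p < r.length := by simpa [rowf] using h2
      rw [List.getElem_set]
      by_cases hpk : k = p
      · subst hpk
        simp [rowf, hck]
      · simp only [if_neg hpk, rowf, List.getElem_mapIdx]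
        split_ifs with g1 g2 g2 <;> first | rfl | (exfalso; omega)
    · rw [if_neg hc]
      have hck : ¬ (r[k] = -1) := by
        rw [List.getD_eq_getElem?_getD, List.getElem?_eq_getElem hk] at hc; simpa using hc
      apply List.ext_getElem (by simp [rowf])
      intro p h1 h2
      have hp : p < r.length := by simpa [rowf] using h2
      simp only [rowf, List.getElem_mapIdx]
      by_cases hpk : p = k
      · subst hpk; simp [hck]
      · split_ifs with g1 g2 g2 <;> first | rfl | (exfalso; omega)
  · have hc : ¬ ((r.getD k 0) = -1) := by
      rw [List.getD_eq_getElem?_getD, List.getElem?_eq_none (by omega)]; simp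
    rw [if_neg hc]
    apply List.ext_getElem (by simp [rowf])
    intro p h1 h2
    have hp : p < r.length := by simpa [rowf] using h2
    simp only [rowf, List.getElem_mapIdx]
    split_ifs with g1 g2 g2 <;> first | rfl | (exfalso; omega)

theorem rowf_zero (matrix : List (List Int)) (r : List Int) : rowf matrix 0 r = r := by
  unfold rowf
  apply List.ext_getElem (by simp)
  intro i h1 h2
  simp

-- A's outer loop over the first k columns, as a per-row map of rowf.
theorem outer_fold (matrix : List (List Int)) (k : Nat) :
    (List.range k).foldl (fun answer j =>
      (List.range matrix.length).foldl (fun a i =>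
        if (a.getD i []).getD j 0 = -1 then a.set i ((a.getD i []).set j (colval matrix j)) else a) answer)
      matrix
    = matrix.map (rowf matrix k) := by
  induction k with
  | zero =>
    simp only [List.range_zero, List.foldl_nil]
    symm
    calc matrix.map (rowf matrix 0) = matrix.map id := List.map_congr_left (fun r _ => rowf_zero matrix r)
      _ = matrix := List.map_id _
  | succ k ih =>
    rw [List.range_succ, List.foldl_append, ih]
    simp only [List.foldl_cons, List.foldl_nil]
    rw [show matrix.length = (matrix.map (rowf matrix k)).length by simp]
    rw [inner_fold, List.take_length, List.drop_length, List.append_nil, List.map_map]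
    exact List.map_congr_left (fun r _ => rowf_step matrix k r)

theorem A_eq (matrix : List (List Int)) :
    modifiedMatrix matrix = matrix.map (rowf matrix ((matrix.getD 0 []).length)) := by
  unfold modifiedMatrix
  simp only []
  rw [show matrix.map (fun row => row) = matrix from List.map_id' matrix]
  have hstep : (fun (answer : List (List Int)) (j : Nat) =>
      (List.range matrix.length).foldl (fun a i =>
        if (a.getD i []).getD j 0 = -1 then
          a.set i ((a.getD i []).set j ((PySem.List.max? ((List.range matrix.length).map (fun i => (matrix.getD i []).getD j 0)) (fun x => x)).getD 0))
        else a) answer)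
    = (fun (answer : List (List Int)) (j : Nat) =>
      (List.range matrix.length).foldl (fun a i =>
        if (a.getD i []).getD j 0 = -1 then a.set i ((a.getD i []).set j (colval matrix j)) else a) answer) := by
    funext answer j
    rw [map_range_getD' matrix (fun r => r.getD j 0)]
    rfl
  rw [hstep]
  exact outer_fold matrix _

-- ===== B-side lemmas =====

-- The cache invariant: every cached value is its column's maximum.
def CacheInv (matrix : List (List Int)) (c : PySem.Dict Int Int) : Prop :=
  ∀ k v, c.get? k = some v → v = colvalB matrix k

theorem cacheInv_empty (matrix : List (List Int)) : CacheInv matrix PySem.Dict.empty := by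
  intro k v h
  rw [PySem.Dict.get?_empty] at h
  exact absurd h (by simp)

-- B's inner loop: whatever valid cache it starts from, it appends the pointwise-fixed row
-- and keeps the cache valid.
theorem inner_B (matrix : List (List Int)) (ps : List (Int × Int)) :
    ∀ (acc : List Int) (c : PySem.Dict Int Int), CacheInv matrix c →
    (ps.foldl
      (fun (st2 : List Int × PySem.Dict Int Int) jv =>
        if jv.2 = -1 then
          let cache := if st2.2.contains jv.1 then st2.2
            else st2.2.insert jv.1 (colvalB matrix jv.1)
          (st2.1 ++ [cache.getD jv.1 0], cache)
        else (st2.1 ++ [jv.2], st2.2))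
      (acc, c)).1
      = acc ++ ps.map (fun jv => if jv.2 = -1 then colvalB matrix jv.1 else jv.2)
    ∧ CacheInv matrix
      (ps.foldl
        (fun (st2 : List Int × PySem.Dict Int Int) jv =>
          if jv.2 = -1 then
            let cache := if st2.2.contains jv.1 then st2.2
              else st2.2.insert jv.1 (colvalB matrix jv.1)
            (st2.1 ++ [cache.getD jv.1 0], cache)
          else (st2.1 ++ [jv.2], st2.2))
        (acc, c)).2 := by
  induction ps with
  | nil => intro acc c hc; simpa using hc
  | cons jv ps ih =>
    intro acc c hc
    simp only [List.foldl_cons, List.map_cons]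
    by_cases hv : jv.2 = -1
    · by_cases hmem : c.contains jv.1
      · have hval : c.getD jv.1 0 = colvalB matrix jv.1 := by
          have hs : (c.get? jv.1).isSome = true := by
            rw [← PySem.Dict.contains_eq_isSome_get?]; exact hmem
          obtain ⟨v, hv'⟩ := Option.isSome_iff_exists.mp hs
          rw [PySem.Dict.getD_eq_get?_getD, hv', Option.getD_some]
          exact hc jv.1 v hv'
        obtain ⟨ihl, ihr⟩ := ih (acc ++ [colvalB matrix jv.1]) c hc
        simp only [hv, hmem, if_true, hval]
        exact ⟨by rw [ihl]; simp, ihr⟩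
      · have hcinv : CacheInv matrix (c.insert jv.1 (colvalB matrix jv.1)) := by
          intro k v h
          rw [PySem.Dict.get?_insert] at h
          by_cases hk : k = jv.1
          · rw [if_pos hk] at h; subst hk; exact (Option.some.inj h).symm
          · rw [if_neg hk] at h; exact hc k v h
        have hmem' : c.contains jv.1 = false := by
          cases hb : c.contains jv.1
          · rfl
          · exact absurd hb hmem
        obtain ⟨ihl, ihr⟩ :=
          ih (acc ++ [colvalB matrix jv.1]) (c.insert jv.1 (colvalB matrix jv.1)) hcinv
        simp only [hv, hmem', Bool.false_eq_true, if_false, reduceIte,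
          PySem.Dict.getD_insert_self]
        exact ⟨by rw [ihl]; simp, ihr⟩
    · obtain ⟨ihl, ihr⟩ := ih (acc ++ [jv.2]) c hc
      simp only [if_neg hv]
      exact ⟨by rw [ihl]; simp, ihr⟩

-- B's outer loop, given the cache invariant, is a per-row map.
theorem outer_B (matrix : List (List Int)) (rows : List (List Int)) :
    ∀ (acc : List (List Int)) (c : PySem.Dict Int Int), CacheInv matrix c →
    (rows.foldl
      (fun (st : List (List Int) × PySem.Dict Int Int) row =>
        let inner := (PySem.List.enumerate row).foldl
          (fun (st2 : List Int × PySem.Dict Int Int) jv =>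
            if jv.2 = -1 then
              let cache := if st2.2.contains jv.1 then st2.2
                else st2.2.insert jv.1 (colvalB matrix jv.1)
              (st2.1 ++ [cache.getD jv.1 0], cache)
            else (st2.1 ++ [jv.2], st2.2))
          ([], st.2)
        (st.1 ++ [inner.1], inner.2))
      (acc, c)).1
    = acc ++ rows.map (fun row =>
        (PySem.List.enumerate row).map (fun jv => if jv.2 = -1 then colvalB matrix jv.1 else jv.2)) := by
  induction rows with
  | nil => intro acc c _; simp
  | cons row rows ih =>
    intro acc c hc
    simp only [List.foldl_cons, List.map_cons]
    obtain ⟨h1, h2⟩ := inner_B matrix (PySem.List.enumerate row) [] c hc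
    rw [List.nil_append] at h1
    rw [h1, ih (acc ++ [(PySem.List.enumerate row).map
      (fun jv => if jv.2 = -1 then colvalB matrix jv.1 else jv.2)]) _ h2]
    simp

theorem B_eq (matrix : List (List Int)) (_h1 : matrix ≠ [])
    (h2 : ∀ row ∈ matrix, (matrix.getD 0 []).length ≤ row.length ∧
      ∀ x ∈ row.drop ((matrix.getD 0 []).length), x ≠ -1) :
    modifiedMatrix_alt matrix = matrix.map (rowf matrix ((matrix.getD 0 []).length)) := by
  unfold modifiedMatrix_alt
  have hfun : (fun (st : List (List Int) × PySem.Dict Int Int) row =>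
      let inner := (PySem.List.enumerate row).foldl
        (fun (st2 : List Int × PySem.Dict Int Int) jv =>
          if jv.2 = -1 then
            let cache := if st2.2.contains jv.1 then st2.2
              else st2.2.insert jv.1
                ((PySem.List.max? (matrix.map (fun r => PySem.List.pyGetD r jv.1 0)) (fun x => x)).getD 0)
            (st2.1 ++ [cache.getD jv.1 0], cache)
          else (st2.1 ++ [jv.2], st2.2))
        ([], st.2)
      (st.1 ++ [inner.1], inner.2))
    = (fun (st : List (List Int) × PySem.Dict Int Int) row =>
      let inner := (PySem.List.enumerate row).foldl
        (fun (st2 : List Int × PySem.Dict Int Int) jv =>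
          if jv.2 = -1 then
            let cache := if st2.2.contains jv.1 then st2.2
              else st2.2.insert jv.1 (colvalB matrix jv.1)
            (st2.1 ++ [cache.getD jv.1 0], cache)
          else (st2.1 ++ [jv.2], st2.2))
        ([], st.2)
      (st.1 ++ [inner.1], inner.2)) := by
    rfl
  rw [hfun, outer_B matrix matrix [] PySem.Dict.empty (cacheInv_empty matrix), List.nil_append]
  apply List.map_congr_left
  intro row hr
  apply List.ext_getElem (by simp [rowf, PySem.List.length_enumerate])
  intro p hp1 hp2
  have hpl : p < row.length := by simpa [PySem.List.length_enumerate] using hp1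
  simp only [List.getElem_map, PySem.List.getElem_enumerate, rowf, List.getElem_mapIdx]
  by_cases hv : row[p] = -1
  · have hpn : p < (matrix.getD 0 []).length := by
      by_contra hge
      exact absurd hv ((h2 row hr).2 row[p]
        (by rw [List.mem_drop_iff_getElem]
            exact ⟨p - (matrix.getD 0 []).length, by omega, by congr 1; omega⟩))
    rw [if_pos hv, if_pos ⟨hpn, hv⟩]
    rw [show ((0:Int) + (p:Int)) = ((p:Nat):Int) by ring, colvalB_natCast]
  · rw [if_neg hv, if_neg (by tauto)]

-- ===== VERDICT (by name: the statement is the Claim_ definition above) =====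
theorem modifiedMatrix_spec : Claim_equal_modifiedMatrix := by
  intro matrix _ hpre
  unfold Pre_modifiedMatrix at hpre
  unfold Spec_modifiedMatrix
  rw [A_eq, B_eq matrix hpre.1 hpre.2]
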